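-- pv_equiv track=rewrite | github.com/tiennvhust/cv_aware_chatbot | chatbot/utils.py | highest_education
-- ===== SOURCE A (Python) =====
-- from typing import List, Dict, Any, Tuple
--
-- def highest_education(profile: Dict[str, Any]) -> Dict[str, str]:
--     # Define order of levels
--     order = {
--         "high school": 1,
--         "associate": 2,
--         "bachelor's": 3,
--         "master's": 4,
--         "phd": 5,
--         "doctorate": 5,
--     }
--     edu = profile.get("education", [])
--     best = None
--     best_rank = -1
--     for e in edu:
--         lvl = e.get("level", "").strip().lower()
--         rank = order.get(lvl, 0)
--         if rank > best_rank:
--             best_rank = rank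
--             best = e
--     return best or {}
-- ===== SOURCE B (Python) =====
-- def highest_education(profile):
--     order = {
--         "high school": 1,
--         "associate": 2,
--         "bachelor's": 3,
--         "master's": 4,
--         "phd": 5,
--         "doctorate": 5,
--     }
--     edu = profile.get("education", [])
--     # Stable sort, descending by rank: among equal ranks the earliest entry stays first.
--     edu_sorted = sorted(edu, key=lambda e: order.get(e.get("level", "").strip().lower(), 0),
--                         reverse=True)
--     return edu_sorted[0] if edu_sorted else {}
-- ===== Notes on version B (the rewrite author's own statement) =====
-- stated objective: alternative
-- what changed: Replaces the manual best/best_rank accumulator loop with a stable descending sort by rank and taking the first element (stability reproduces A's first-wins tie-breaking).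
import Mathlib
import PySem

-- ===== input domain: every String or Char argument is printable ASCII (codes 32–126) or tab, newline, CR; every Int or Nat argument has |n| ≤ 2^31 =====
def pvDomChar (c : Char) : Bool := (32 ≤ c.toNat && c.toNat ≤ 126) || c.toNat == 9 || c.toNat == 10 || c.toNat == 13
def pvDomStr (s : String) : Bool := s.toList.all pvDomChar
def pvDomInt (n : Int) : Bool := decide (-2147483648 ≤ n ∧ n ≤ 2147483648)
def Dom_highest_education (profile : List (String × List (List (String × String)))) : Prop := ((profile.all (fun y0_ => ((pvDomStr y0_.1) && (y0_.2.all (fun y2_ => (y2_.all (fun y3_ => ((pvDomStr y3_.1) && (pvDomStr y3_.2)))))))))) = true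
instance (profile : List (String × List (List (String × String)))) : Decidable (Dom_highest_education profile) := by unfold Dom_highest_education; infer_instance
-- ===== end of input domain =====

-- B replaces A's manual best/best_rank loop with a stable descending sort by rank
-- and takes the first element (alternative decomposition; same return values).


-- ===== PORT A =====
-- the 'order' dict literal, and the rank of one education entry:
-- order.get(e.get("level", "").strip().lower(), 0)  (identical expression in both Pythons)
def eduOrder : PySem.Dict String Int :=
  ⟨[("high school", 1), ("associate", 2), ("bachelor's", 3),
    ("master's", 4), ("phd", 5), ("doctorate", 5)]⟩

def eduRank (e : List (String × String)) : Int :=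
  PySem.Dict.getD eduOrder (PySem.Str.lower (PySem.Str.strip (PySem.Dict.getD ⟨e⟩ "level" ""))) 0

def highest_education (profile : List (String × List (List (String × String)))) : List (String × String) :=
  let edu := PySem.Dict.getD ⟨profile⟩ "education" []
  let r := edu.foldl
    (fun (st : Option (List (String × String)) × Int) e =>
      let rank := eduRank e
      if rank > st.2 then (some e, rank) else st)
    (none, -1)
  match r.1 with
  | none => []        -- best or {}
  | some b => b       -- (b or {} = b, since an empty dict is [] already)

-- ===== PORT B =====
def highest_education_alt (profile : List (String × List (List (String × String)))) : List (String × String) :=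
  let edu := PySem.Dict.getD ⟨profile⟩ "education" []
  let eduSorted := PySem.List.sorted edu eduRank true
  match eduSorted with
  | [] => []          -- edu_sorted[0] if edu_sorted else {}
  | h :: _ => h

-- ===== PRECONDITION & SPEC =====
def Spec_highest_education (profile : List (String × List (List (String × String)))) (out : List (String × String)) : Prop := out = highest_education_alt profile
instance (profile : List (String × List (List (String × String)))) (out : List (String × String)) : Decidable (Spec_highest_education profile out) := by unfold Spec_highest_education; infer_instance

-- ===== CLAIM (what is proved, stated in full; the proofs are below) =====
def Claim_equal_highest_education : Prop := ∀ (profile : List (String × List (List (String × String)))), Dom_highest_education profile → Spec_highest_education profile (highest_education profile)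

-- ===== LEMMAS AND PROOFS =====

-- the common value both programs compute on a nonempty list: the first entry of
-- maximal key, phrased as a forward scan keeping the incumbent on ties
def pickFrom {α : Type} (key : α → Int) (b : α) : List α → α
  | [] => b
  | x :: xs => pickFrom key (if key b < key x then x else b) xs

-- every rank is ≥ 0 (dict values are positive, default is 0)
theorem eduRank_nonneg (e : List (String × String)) : 0 ≤ eduRank e := by
  simp only [eduRank, eduOrder, PySem.Dict.getD, PySem.Dict.get?]
  cases h : List.find? (fun p => p.1 == PySem.Str.lower (PySem.Str.strip ((Option.map (fun x => x.2) (List.find? (fun p => p.1 == "level") e)).getD ""))) ([("high school", 1), ("associate", 2), ("bachelor's", 3), ("master's", 4), ("phd", 5), ("doctorate", 5)] : List (String × Int)) with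
  | none => simp
  | some p =>
    have hm := List.mem_of_find?_eq_some h
    simp only [List.mem_cons, List.not_mem_nil, or_false] at hm
    rcases hm with rfl | rfl | rfl | rfl | rfl | rfl <;> simp

-- A's loop from an already-set incumbent computes pickFrom
theorem foldl_step_eq_pickFrom {α : Type} (key : α → Int) (xs : List α) :
    ∀ (b : α),
      xs.foldl (fun (st : Option α × Int) e =>
          if key e > st.2 then (some e, key e) else st) (some b, key b)
        = (some (pickFrom key b xs), key (pickFrom key b xs)) := by
  induction xs with
  | nil => intro b; simp [pickFrom]
  | cons x xs ih =>
    intro b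
    simp only [List.foldl_cons, pickFrom]
    by_cases h : key b < key x
    · simp [h, gt_iff_lt, ih]
    · have h' : ¬ key x > key b := h
      simp [h, ih]

-- head of B's reverse insertion sort, folded from a nonempty accumulator,
-- also computes pickFrom over the remaining elements
theorem head_foldl_insertBy {α : Type} (key : α → Int) (xs : List α) :
    ∀ (b : α) (t : List α),
      (xs.foldl (fun acc x => PySem.List.insertBy (fun a c => decide (key c < key a)) x acc) (b :: t)).head?
        = some (pickFrom key b xs) := by
  induction xs with
  | nil => intro b t; simp [pickFrom]
  | cons x xs ih =>
    intro b t
    simp only [List.foldl_cons, pickFrom, PySem.List.insertBy]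
    by_cases h : key b < key x
    · simp [h, ih]
    · simp [h, ih]

theorem highest_education_spec : Claim_equal_highest_education := by
  intro profile _
  unfold Spec_highest_education highest_education highest_education_alt
  dsimp only
  cases hedu : PySem.Dict.getD (⟨profile⟩ : PySem.Dict String (List (List (String × String)))) "education" [] with
  | nil => simp [PySem.List.sorted]
  | cons x xs =>
    rw [PySem.List.sorted_rev_eq_foldl_insertBy]
    simp only [List.foldl_cons]
    have h0 : eduRank x > (-1 : Int) := by have := eduRank_nonneg x; omega
    rw [if_pos h0]
    rw [foldl_step_eq_pickFrom eduRank xs x]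
    simp only [PySem.List.insertBy]
    have hb := head_foldl_insertBy eduRank xs x []
    cases hfold : (xs.foldl (fun acc y => PySem.List.insertBy (fun a c => decide (eduRank c < eduRank a)) y acc) [x]) with
    | nil => rw [hfold] at hb; simp at hb
    | cons h t =>
      rw [hfold] at hb
      simp at hb
      simp [hb]
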